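-- pv_equiv track=rewrite | github.com/ColinsGitCode/WITF_Codes | PyCodes/WITF.py | Drafts_del_dict
-- ===== SOURCE A (Python) =====
-- import copy
--
-- def Drafts_del_dict(Arr,B_dic):
--     deep_B = copy.deepcopy(B_dic)
--     for ele in Arr:
--         try:
--             del deep_B[ele]
--         except KeyError:
--             pass
--     return deep_B
-- ===== SOURCE B (Python) =====
-- import copy
--
-- def Drafts_del_dict(Arr, B_dic):
--     drop = set(Arr)
--     filtered = {k: v for k, v in B_dic.items() if k not in drop}
--     return copy.deepcopy(filtered)
-- ===== Notes on version B (the rewrite author's own statement) =====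
-- stated objective: simpler
-- what changed: B builds a drop set from Arr and constructs the result by one comprehension over B_dic's items keeping keys outside the set, then deep-copies once at the end, instead of deep-copying first and deleting key by key under try/except.
import Mathlib
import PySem

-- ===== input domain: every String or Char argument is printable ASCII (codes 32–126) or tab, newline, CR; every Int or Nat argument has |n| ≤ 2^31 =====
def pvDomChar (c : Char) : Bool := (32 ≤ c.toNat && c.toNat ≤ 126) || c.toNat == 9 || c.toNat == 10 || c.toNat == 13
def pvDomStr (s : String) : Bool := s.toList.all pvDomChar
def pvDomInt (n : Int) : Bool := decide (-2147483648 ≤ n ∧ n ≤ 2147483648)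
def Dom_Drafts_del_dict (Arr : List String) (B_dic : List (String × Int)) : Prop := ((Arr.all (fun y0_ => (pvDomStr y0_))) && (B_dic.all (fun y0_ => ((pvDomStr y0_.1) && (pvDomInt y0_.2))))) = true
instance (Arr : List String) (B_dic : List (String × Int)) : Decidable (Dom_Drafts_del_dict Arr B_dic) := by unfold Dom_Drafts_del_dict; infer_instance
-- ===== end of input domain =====

-- B builds a drop set from Arr and keeps the items of B_dic whose key is outside it
-- (one pass over the dict, single deepcopy at the end) instead of deleting key by key
-- under try/except after an up-front deepcopy; same return value, objective: simpler.


-- ===== PORT A =====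
-- deep_B = copy.deepcopy(B_dic); for ele in Arr: del deep_B[ele] (KeyError ignored); return deep_B
-- (deepcopy of a dict of ints is the identity on the value level; the dict is modelled by PySem.Dict)
def Drafts_del_dict (Arr : List String) (B_dic : List (String × Int)) : List (String × Int) :=
  (Arr.foldl (fun d ele => d.erase ele) (PySem.Dict.ofList B_dic)).items

-- ===== PORT B =====
-- drop = set(Arr); filtered = {k: v for k, v in B_dic.items() if k not in drop}; return copy.deepcopy(filtered)
-- (keys of B_dic.items() are already unique, so the comprehension is a filter of the item list)
def Drafts_del_dict_alt (Arr : List String) (B_dic : List (String × Int)) : List (String × Int) :=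
  let drop := PySem.Set.ofList Arr
  (PySem.Dict.ofList B_dic).items.filter (fun p => !(PySem.Set.contains drop p.1))

-- ===== PRECONDITION & SPEC =====
def Spec_Drafts_del_dict (Arr : List String) (B_dic : List (String × Int)) (out : List (String × Int)) : Prop := out = Drafts_del_dict_alt Arr B_dic
instance (Arr : List String) (B_dic : List (String × Int)) (out : List (String × Int)) : Decidable (Spec_Drafts_del_dict Arr B_dic out) := by unfold Spec_Drafts_del_dict; infer_instance

-- ===== CLAIM (what is proved, stated in full; the proofs are below) =====
def Claim_equal_Drafts_del_dict : Prop := ∀ (Arr : List String) (B_dic : List (String × Int)), Dom_Drafts_del_dict Arr B_dic → Spec_Drafts_del_dict Arr B_dic (Drafts_del_dict Arr B_dic)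

-- ===== LEMMAS AND PROOFS =====

-- A's delete loop over Arr is a single filter keeping keys not in Arr.
theorem foldl_erase_items (Arr : List String) (d : PySem.Dict String Int) :
    (Arr.foldl (fun d ele => d.erase ele) d).items
      = d.items.filter (fun p => !(Arr.contains p.1)) := by
  induction Arr generalizing d with
  | nil => simp
  | cons e t ih =>
    rw [List.foldl_cons, ih, PySem.Dict.erase, List.filter_filter]
    apply List.filter_congr
    intro p _
    simp only [List.contains_cons, Bool.not_or]
    rw [Bool.and_comm, BEq.comm]

-- ===== VERDICT (by name: the statement is the Claim_ definition above) =====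
theorem Drafts_del_dict_spec : Claim_equal_Drafts_del_dict := by
  intro Arr B_dic _
  unfold Spec_Drafts_del_dict Drafts_del_dict Drafts_del_dict_alt
  rw [foldl_erase_items]
  apply List.filter_congr
  intro p _
  congr 1
  simp [PySem.Set.contains_eq_listContains, List.contains_eq_mem, PySem.Set.mem_ofList]
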